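-- pv_equiv track=rewrite | github.com/anhducnguyen2006/Google-Kickstart-2022-Round-A | challenge_nine.py | solve
-- ===== SOURCE A (Python) =====
-- def solve(n):
--     # create a list filled with digits from the n number
--     w = [int(i) for i in str(n)]
--
--     # check if the number is already divisible by 9, if so,
--     # we're just going to insert to the 2nd position (index 1) of the
--     # n number so we receive the smallest number possible
--     if sum(w)%9==0:
--         w.insert(1,0)
--         return "".join(map(str,w))
--     # We do this because the additional number 0 cannot be inserted at
--     # the beginning (no leading zeros)
--
--     # if n % 9 !==0, create an array filled with numbers,
--     # that - when you insert them, the sum of all the digits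
--     # will be divisible by 9.
--     ar = []
--     for i in range(1,9):
--         if (sum(w)+i)%9==0:
--             ar.append(i)
--     # what we need only is the smallest number that will
--     # fulfill the requirement
--     ans = min(ar)
--     # now we find the place to insert the additional number
--     # so that we receive the smallest possible number divisible by 9
--     for j in range(len(w)):
--         # that's why here we're checking if the additional number is
--         # smaller then the current digit in the "list of digits of n"
--         # eg. in the number 915, the smallest number needed to insert
--         # is 3. if 3<9, we should insert it before 9 to minimize the
--         # number -> 915 -> 3915
--         if ans<w[j]:
--             w.insert(j,str(ans))
--             return "".join(map(str,w))
--             break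
--     else:
--         # else we're gonna insert that number at the end
--         # because it's greater than any other digits in the n number
--         w.insert(len(w),str(ans))
--         return "".join(map(str,w))
-- ===== SOURCE B (Python) =====
-- def solve(n):
--     w = [int(c) for c in str(n)]
--     s = sum(w)
--     d = 0 if s % 9 == 0 else 9 - s % 9
--     t = str(n)
--     cands = [t[:k] + str(d) + t[k:] for k in range(len(t) + 1)]
--     good = [c for c in cands if not c.startswith('0')]
--     return min(good) if good else min(cands)
-- ===== Notes on version B (the rewrite author's own statement) =====
-- stated objective: alternative
-- what changed: A greedily scans the digits and inserts the needed digit before the first strictly larger digit (with a special-cased index-1 insertion when the digit sum is already divisible by 9); B instead computes the needed digit arithmetically, generates every insertion position of it into str(n), and returns the lexicographic minimum among candidates without a leading zero, falling back to the minimum over all candidates when every candidate has a leading zero.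
import Mathlib
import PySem

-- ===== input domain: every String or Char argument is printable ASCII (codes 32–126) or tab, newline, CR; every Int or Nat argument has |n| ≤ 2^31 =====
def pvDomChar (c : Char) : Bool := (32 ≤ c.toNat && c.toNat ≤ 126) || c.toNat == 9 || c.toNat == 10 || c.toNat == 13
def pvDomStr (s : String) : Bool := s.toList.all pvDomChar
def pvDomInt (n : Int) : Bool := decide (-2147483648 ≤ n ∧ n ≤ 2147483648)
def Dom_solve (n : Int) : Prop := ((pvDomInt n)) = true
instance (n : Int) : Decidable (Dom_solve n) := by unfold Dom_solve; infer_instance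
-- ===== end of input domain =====

-- B replaces A's greedy insert-before-first-larger-digit scan by generate-all-insertion-
-- positions-and-take-the-lexicographic-minimum (alternative decomposition, not faster).


-- ===== PORT A =====
-- int(i) for one character i of str(n); `none` (ValueError, e.g. the '-' of a negative n)
-- is excluded by Pre_solve
def pvDigit (c : Char) : Int := (PySem.Int.ofChars? [c]).getD 0

-- "".join(map(str, l))  (A inserts the string str(ans) into the int list; mapping str
-- over the mixed list yields the same characters, so the int list is joined directly)
def pvJoinDigits (l : List Int) : String := PySem.Str.join "" (l.map PySem.Int.toStr)

-- the `for j in range(len(w)): … else: …` loop of A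
def solveLoop (w : List Int) (ans : Int) (j : Nat) : String :=
  if h : j < w.length then
    if ans < w[j] then pvJoinDigits (PySem.List.insert w (j : Int) ans)
    else solveLoop w ans (j + 1)
  else pvJoinDigits (PySem.List.insert w (w.length : Int) ans)
termination_by w.length - j

def solve (n : Int) : String :=
  let w := (PySem.Int.toChars n).map pvDigit
  if PySem.Int.mod w.sum 9 == 0 then
    pvJoinDigits (PySem.List.insert w 1 0)
  else
    let ar := (PySem.List.pyRange 1 9).filter (fun i => PySem.Int.mod (w.sum + i) 9 == 0)
    let ans := (PySem.List.min? ar (fun x => x)).getD 0  -- min(ar); ar is never [] when sum % 9 ≠ 0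
    solveLoop w ans 0

-- ===== PORT B =====
def solve_alt (n : Int) : String :=
  let w := (PySem.Int.toChars n).map pvDigit
  let s := w.sum
  let d : Int := if PySem.Int.mod s 9 == 0 then 0 else 9 - PySem.Int.mod s 9
  let t := PySem.Int.toChars n
  -- t[:k] + str(d) + t[k:] for k in range(len(t) + 1)
  let cands := (List.range (t.length + 1)).map
    (fun k => String.ofList (t.take k ++ PySem.Int.toChars d ++ t.drop k))
  let good := cands.filter (fun c => !(PySem.Str.startswith c "0"))
  if good.isEmpty then (PySem.List.min? cands (fun x => x)).getD ""
  else (PySem.List.min? good (fun x => x)).getD ""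

-- ===== PRECONDITION & SPEC =====
-- Pre_ excludes exactly the inputs where A raises: on n < 0, int('-') raises ValueError
-- (both A and B raise there).
def Pre_solve (n : Int) : Prop := 0 ≤ n
instance (n : Int) : Decidable (Pre_solve n) := by unfold Pre_solve; infer_instance
def pvWitness_solve : Int := 19

def Spec_solve (n : Int) (out : String) : Prop := out = solve_alt n
instance (n : Int) (out : String) : Decidable (Spec_solve n out) := by unfold Spec_solve; infer_instance

-- ===== CLAIM (what is proved, stated in full; the proofs are below) =====
def Claim_equal_solve : Prop := ∀ (n : Int), Dom_solve n → Pre_solve n → Spec_solve n (solve n)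

-- ===== LEMMAS AND PROOFS =====

-- a decimal digit character
abbrev IsDig (c : Char) : Prop := 48 ≤ c.toNat ∧ c.toNat ≤ 57

theorem pmod9 (a : Int) : PySem.Int.mod a 9 = a % 9 := by
  simp [PySem.Int.mod, Int.fmod_eq_emod]

theorem dig_cases (c : Char) (h : IsDig c) :
    c = '0' ∨ c = '1' ∨ c = '2' ∨ c = '3' ∨ c = '4' ∨ c = '5' ∨ c = '6' ∨ c = '7' ∨ c = '8' ∨ c = '9' := by
  obtain ⟨h1, h2⟩ := h
  have hx : c.toNat = 48 ∨ c.toNat = 49 ∨ c.toNat = 50 ∨ c.toNat = 51 ∨ c.toNat = 52 ∨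
      c.toNat = 53 ∨ c.toNat = 54 ∨ c.toNat = 55 ∨ c.toNat = 56 ∨ c.toNat = 57 := by omega
  rcases hx with h|h|h|h|h|h|h|h|h|h <;>
    (have h2 := Char.ofNat_toNat c; rw [h] at h2; rw [← h2]; decide)

theorem dv_toChars (c : Char) (h : IsDig c) : PySem.Int.toChars (pvDigit c) = [c] := by
  rcases dig_cases c h with rfl|rfl|rfl|rfl|rfl|rfl|rfl|rfl|rfl|rfl <;> decide

theorem dv_le_iff (a b : Char) (ha : IsDig a) (hb : IsDig b) : a ≤ b ↔ pvDigit a ≤ pvDigit b := by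
  rcases dig_cases a ha with rfl|rfl|rfl|rfl|rfl|rfl|rfl|rfl|rfl|rfl <;>
    rcases dig_cases b hb with rfl|rfl|rfl|rfl|rfl|rfl|rfl|rfl|rfl|rfl <;> decide

theorem dv_lt_iff (a b : Char) (ha : IsDig a) (hb : IsDig b) : a < b ↔ pvDigit a < pvDigit b := by
  rcases dig_cases a ha with rfl|rfl|rfl|rfl|rfl|rfl|rfl|rfl|rfl|rfl <;>
    rcases dig_cases b hb with rfl|rfl|rfl|rfl|rfl|rfl|rfl|rfl|rfl|rfl <;> decide

-- "".join with empty separator is concatenation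
theorem intercalate_nil_char : ∀ (xss : List (List Char)), List.intercalate [] xss = xss.flatten
  | [] => rfl
  | [x] => by simp [List.intercalate]
  | x :: y :: ys => by
    have ih := intercalate_nil_char (y :: ys)
    rw [List.intercalate] at ih ⊢
    rw [show List.intersperse ([] : List Char) (x :: y :: ys)
        = x :: [] :: List.intersperse [] (y :: ys) from by simp [List.intersperse]]
    simp only [List.flatten]
    rw [ih]
    simp

theorem joinD (l : List Int) :
    pvJoinDigits l = String.ofList ((l.map PySem.Int.toChars).flatten) := by
  simp only [pvJoinDigits, PySem.Str.join, PySem.Chars.join, List.map_map,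
    Function.comp_def, PySem.Int.toList_toStr]
  rw [show ("" : String).toList = [] from rfl, intercalate_nil_char]

theorem join_digits (u : List Char) (h : ∀ c ∈ u, IsDig c) :
    pvJoinDigits (u.map pvDigit) = String.ofList u := by
  rw [joinD]
  congr 1
  induction u with
  | nil => rfl
  | cons c cs ih =>
    simp only [List.map_cons, List.flatten_cons]
    rw [dv_toChars c (h c (by simp)), ih (fun x hx => h x (by simp [hx]))]
    rfl

-- startswith on an explicit cons
theorem sw_ofList (c : Char) (u : List Char) :
    PySem.Str.startswith (String.ofList (c :: u)) "0" = (c == '0') := by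
  rw [PySem.Str.startswith, String.toList_ofList,
    show ("0" : String).toList = ['0'] from rfl]
  simp [PySem.Chars.startswith, List.isPrefixOf, BEq.comm]

-- Nat.toDigitsCore facts
theorem tdc_dig : ∀ (fuel n : Nat) (ds : List Char), (∀ c ∈ ds, IsDig c) →
    ∀ c ∈ Nat.toDigitsCore 10 fuel n ds, IsDig c := by
  intro fuel
  induction fuel with
  | zero => intro n ds h c hc; rw [Nat.toDigitsCore] at hc; exact h c hc
  | succ fuel ih =>
    intro n ds h c hc
    rw [Nat.toDigitsCore] at hc
    have hd : IsDig (Nat.digitChar (n % 10)) := by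
      have h10 : n % 10 < 10 := Nat.mod_lt _ (by omega)
      interval_cases h : n % 10 <;> decide
    by_cases h0 : n / 10 = 0
    · rw [if_pos h0] at hc
      rcases List.mem_cons.mp hc with rfl | hm
      · exact hd
      · exact h c hm
    · rw [if_neg h0] at hc
      exact ih (n / 10) _ (by
        intro x hx
        rcases List.mem_cons.mp hx with rfl | hm
        · exact hd
        · exact h x hm) c hc

theorem tdc_head : ∀ (fuel n : Nat) (ds : List Char), 0 < n → n < 10 ^ fuel →
    ∃ c r, Nat.toDigitsCore 10 fuel n ds = c :: r ∧ c ≠ '0' := by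
  intro fuel
  induction fuel with
  | zero => intro n ds h1 h2; simp at h2; omega
  | succ fuel ih =>
    intro n ds h1 h2
    rw [Nat.toDigitsCore]
    by_cases h0 : n / 10 = 0
    · rw [if_pos h0]
      have hlt : n < 10 := by
        by_contra hge
        have : n / 10 ≠ 0 := by
          have : 1 ≤ n / 10 := (Nat.one_le_div_iff (by omega)).mpr (by omega)
          omega
        exact this h0
      have hmod : n % 10 = n := Nat.mod_eq_of_lt hlt
      rw [hmod]
      refine ⟨Nat.digitChar n, ds, rfl, ?_⟩
      interval_cases n <;> decide
    · rw [if_neg h0]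
      exact ih (n / 10) _ (Nat.pos_of_ne_zero h0) (by
        rw [Nat.div_lt_iff_lt_mul (show 0 < 10 by omega)]
        calc n < 10 ^ (fuel + 1) := h2
          _ = 10 ^ fuel * 10 := by ring)

theorem toChars_digs (n : Int) (h : 0 ≤ n) : ∀ c ∈ PySem.Int.toChars n, IsDig c := by
  intro c hc
  rw [PySem.Int.toChars, if_neg (by omega)] at hc
  exact tdc_dig _ _ [] (by simp) c hc

theorem toChars_lead (n : Int) (h : 0 ≤ n) :
    PySem.Int.toChars n = ['0'] ∨ ∃ c r, PySem.Int.toChars n = c :: r ∧ c ≠ '0' := by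
  rw [PySem.Int.toChars, if_neg (by omega)]
  by_cases hz : n.toNat = 0
  · left; rw [hz]; decide
  · right
    have hpos : 0 < n.toNat := Nat.pos_of_ne_zero hz
    have hlt : n.toNat < 10 ^ (n.toNat + 1) := by
      calc n.toNat < 2 ^ n.toNat := Nat.lt_two_pow_self
        _ ≤ 2 ^ (n.toNat + 1) := Nat.pow_le_pow_right (by omega) (by omega)
        _ ≤ 10 ^ (n.toNat + 1) := Nat.pow_le_pow_left (by omega) _
    exact tdc_head (n.toNat + 1) n.toNat [] hpos hlt

-- A's scanning loop inserts at the first index whose digit exceeds ans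
theorem solveLoop_go (w : List Int) (ans : Int) (j : Nat) :
    j ≤ w.length →
    solveLoop w ans j =
      pvJoinDigits (PySem.List.insert w
        ((j + (w.drop j).findIdx (fun x => decide (ans < x)) : Nat) : Int) ans) := by
  fun_induction solveLoop w ans j with
  | case1 j h hlt =>
    intro _
    have hdrop : w.drop j = w[j] :: w.drop (j + 1) := List.drop_eq_getElem_cons h
    rw [hdrop, List.findIdx_cons]
    simp [hlt]
  | case2 j h hlt ih =>
    intro _
    have hdrop : w.drop j = w[j] :: w.drop (j + 1) := List.drop_eq_getElem_cons h
    rw [hdrop, List.findIdx_cons]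
    simp only [hlt, decide_false, cond_false]
    rw [ih (by omega)]
    congr 2
    push_cast
    ring
  | case3 j h =>
    intro hj
    have hje : j = w.length := by omega
    subst hje
    simp [List.drop_length]

-- lexicographic list facts: inserting dc at position 0 / at the first index carrying a
-- strictly larger digit is minimal among all insertion positions
theorem KL1 (dc : Char) : ∀ (xs : List Char) (k : Nat), (∀ a ∈ xs, dc ≤ a) →
    dc :: xs ≤ xs.take k ++ dc :: xs.drop k := by
  intro xs
  induction xs with
  | nil => intro k _; simp
  | cons y ys ih =>
    intro k hall
    cases k with
    | zero => simp
    | succ k =>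
      simp only [List.take_succ_cons, List.drop_succ_cons, List.cons_append]
      have hy : dc ≤ y := hall y (by simp)
      rcases lt_or_eq_of_le hy with hlt | rfl
      · exact le_of_lt (List.Lex.rel hlt)
      · exact List.cons_le_cons dc (ih k (fun a ha => hall a (by simp [ha])))

theorem KL2 : ∀ (J : Nat) (dc : Char) (xs : List Char) (k : Nat), J ≤ xs.length → k ≤ xs.length →
    (∀ i (h : i < xs.length), i < J → xs[i] ≤ dc) →
    (J = xs.length ∨ ∃ h : J < xs.length, dc < xs[J]) →
    xs.take J ++ dc :: xs.drop J ≤ xs.take k ++ dc :: xs.drop k := by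
  intro J
  induction J with
  | zero =>
    intro dc xs k hJ hk hsmall hJt
    rcases hJt with hlen | ⟨h, hlt⟩
    · have hnil : xs = [] := List.length_eq_zero_iff.mp hlen.symm
      subst hnil
      simp at hk
      subst hk
      simp
    · cases xs with
      | nil => simp at h
      | cons y ys =>
        simp only [List.getElem_cons_zero] at hlt
        cases k with
        | zero => simp
        | succ k =>
          simp only [List.take_zero, List.drop_zero, List.nil_append,
            List.take_succ_cons, List.drop_succ_cons, List.cons_append]
          exact le_of_lt (List.Lex.rel hlt)
  | succ J ih =>
    intro dc xs k hJ hk hsmall hJt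
    cases xs with
    | nil => simp at hJ
    | cons y ys =>
      have hy : y ≤ dc := hsmall 0 (by simp) (by omega)
      have hsmall' : ∀ i (h : i < ys.length), i < J → ys[i] ≤ dc := by
        intro i h hi
        have := hsmall (i + 1) (by simp; omega) (by omega)
        simpa using this
      have hJt' : J = ys.length ∨ ∃ h : J < ys.length, dc < ys[J] := by
        rcases hJt with hlen | ⟨h, hlt⟩
        · left
          simpa using hlen
        · right
          refine ⟨by simpa using h, ?_⟩
          simpa using hlt
      cases k with
      | zero =>
        simp only [List.take_succ_cons, List.drop_succ_cons, List.cons_append,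
          List.take_zero, List.drop_zero, List.nil_append]
        rcases lt_or_eq_of_le hy with hlt | rfl
        · exact le_of_lt (List.Lex.rel hlt)
        · exact List.cons_le_cons y (ih y ys 0 (by simpa using hJ) (by omega) hsmall' hJt')
      | succ k =>
        simp only [List.take_succ_cons, List.drop_succ_cons, List.cons_append]
        exact List.cons_le_cons y
          (ih dc ys k (by simpa using hJ) (by simpa using hk) hsmall' hJt')

theorem foldl_min_eq {α : Type} [LinearOrder α] :
    ∀ (l : List α) (x m : α), m ∈ x :: l → (∀ y ∈ x :: l, m ≤ y) → l.foldl min x = m := by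
  intro l
  induction l with
  | nil =>
    intro x m hmem hlb
    simp at hmem
    subst hmem
    rfl
  | cons y l ih =>
    intro x m hmem hlb
    simp only [List.foldl_cons]
    rcases List.mem_cons.mp hmem with rfl | hmem'
    · rw [min_eq_left (hlb y (by simp))]
      exact ih m m (by simp) (by
        intro z hz
        rcases List.mem_cons.mp hz with rfl | hz'
        · exact le_refl _
        · exact hlb z (by simp [hz']))
    · rcases List.mem_cons.mp hmem' with rfl | hml
      · have hxy : min x m = m := min_eq_right (hlb x (by simp))
        rw [hxy]
        exact ih m m (by simp) (by
          intro z hz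
          rcases List.mem_cons.mp hz with rfl | hz'
          · exact le_refl _
          · exact hlb z (by simp [hz']))
      · refine ih (min x y) m (by simp [hml]) ?_
        intro z hz
        rcases List.mem_cons.mp hz with rfl | hz'
        · exact le_min (hlb x (by simp)) (hlb y (by simp))
        · exact hlb z (by simp [hz'])

theorem min?_first {α : Type} [LinearOrder α] (x : α) (l : List α) (m : α)
    (hmem : m ∈ x :: l) (hlb : ∀ y ∈ x :: l, m ≤ y) :
    PySem.List.min? (x :: l) (fun y => y) = some m := by
  rw [PySem.List.min?_id_cons, foldl_min_eq l x m hmem hlb]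

theorem ar_eq (s : Int) (hm : PySem.Int.mod s 9 ≠ 0) :
    (PySem.List.pyRange 1 9).filter (fun i => PySem.Int.mod (s + i) 9 == 0) =
      [9 - PySem.Int.mod s 9] := by
  have hpr : PySem.List.pyRange 1 9 = [1, 2, 3, 4, 5, 6, 7, 8] := by decide
  rw [hpr]
  simp only [pmod9] at hm ⊢
  have hcg : List.filter (fun i => ((s + i) % 9 == 0)) [1, 2, 3, 4, 5, 6, 7, 8] =
      List.filter (fun i => (i == 9 - s % 9)) [1, 2, 3, 4, 5, 6, 7, 8] := by
    apply List.filter_congr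
    intro i hi
    fin_cases hi <;> (rw [Bool.eq_iff_iff]; simp only [beq_iff_eq]; omega)
  rw [hcg]
  have h9 : s % 9 = 1 ∨ s % 9 = 2 ∨ s % 9 = 3 ∨ s % 9 = 4 ∨ s % 9 = 5 ∨
      s % 9 = 6 ∨ s % 9 = 7 ∨ s % 9 = 8 := by omega
  rcases h9 with h|h|h|h|h|h|h|h <;> rw [h] <;> decide

set_option maxRecDepth 8000 in
theorem main_gen (t : List Char)
    (hdig : ∀ c ∈ t, IsDig c)
    (hlead : t = ['0'] ∨ ∃ c r, t = c :: r ∧ c ≠ '0') :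
    (let w := t.map pvDigit
     if PySem.Int.mod w.sum 9 == 0 then pvJoinDigits (PySem.List.insert w 1 0)
     else
       let ar := (PySem.List.pyRange 1 9).filter (fun i => PySem.Int.mod (w.sum + i) 9 == 0)
       let ans := (PySem.List.min? ar (fun x => x)).getD 0
       solveLoop w ans 0)
    =
    (let w := t.map pvDigit
     let s := w.sum
     let d : Int := if PySem.Int.mod s 9 == 0 then 0 else 9 - PySem.Int.mod s 9
     let cands := (List.range (t.length + 1)).map
       (fun k => String.ofList (t.take k ++ PySem.Int.toChars d ++ t.drop k))
     let good := cands.filter (fun c => !(PySem.Str.startswith c "0"))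
     if good.isEmpty then (PySem.List.min? cands (fun x => x)).getD ""
     else (PySem.List.min? good (fun x => x)).getD "") := by
  dsimp only
  simp only [beq_iff_eq]
  have hne : t ≠ [] := by
    rcases hlead with rfl | ⟨c, r, rfl, _⟩ <;> simp
  obtain ⟨c, rest, rfl⟩ : ∃ c r, t = c :: r := by
    cases t with
    | nil => exact absurd rfl hne
    | cons c r => exact ⟨c, r, rfl⟩
  by_cases hm : PySem.Int.mod (((c :: rest).map pvDigit).sum) 9 = 0
  · -- digit sum divisible by 9: the inserted digit is 0
    rw [if_pos hm, if_pos hm]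
    by_cases hc0 : c = '0'
    · -- a leading zero digit means t is the single-digit string of zero; both sides
      -- compute the same two-character result
      subst hc0
      have hr : rest = [] := by
        rcases hlead with heq | ⟨c', r', heq, hne'⟩
        · simpa using heq
        · injection heq with hc _
          exact absurd hc.symm hne'
      subst hr
      have h1 : PySem.List.insert ((['0'] : List Char).map pvDigit) 1 0
          = (['0', '0'] : List Char).map pvDigit := by
        rw [show (1 : Int) = ((1 : Nat) : Int) from by norm_num,
          PySem.List.insert_natCast _ 1 _ (by simp)]
        simp only [List.map_cons, List.map_nil, List.take_succ_cons, List.take_zero,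
          List.drop_succ_cons, List.drop_zero, List.cons_append, List.nil_append]
        rw [show (0 : Int) = pvDigit '0' from by decide]
      rw [show PySem.Int.toChars 0 = ['0'] from by decide, h1,
        join_digits _ (by intro x hx; simp at hx; subst hx; decide),
        show (List.range ((['0'] : List Char).length + 1)).map
            (fun k => String.ofList (List.take k ['0'] ++ ['0'] ++ List.drop k ['0']))
          = [String.ofList ('0' :: ['0']), String.ofList ('0' :: ['0'])] from rfl,
        List.filter_cons, List.filter_cons, sw_ofList]
      simp only [List.filter_nil, beq_self_eq_true, Bool.not_true, Bool.false_eq_true, if_false,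
        List.isEmpty_nil, if_true]
      rw [PySem.List.min?_id_cons]
      simp
    · -- A inserts 0 at index 1; B's minimum non-leading-zero candidate is the same string
      have hdig2 : ∀ x ∈ c :: '0' :: rest, IsDig x := by
        intro x hx
        rcases List.mem_cons.mp hx with rfl | hx'
        · exact hdig x (by simp)
        · rcases List.mem_cons.mp hx' with rfl | hx''
          · decide
          · exact hdig x (by simp [hx''])
      have hA : pvJoinDigits (PySem.List.insert ((c :: rest).map pvDigit) 1 0)
          = String.ofList (c :: '0' :: rest) := by
        have h1 : PySem.List.insert ((c :: rest).map pvDigit) 1 0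
            = (c :: '0' :: rest).map pvDigit := by
          rw [show (1 : Int) = ((1 : Nat) : Int) from by norm_num,
            PySem.List.insert_natCast _ 1 _ (by simp)]
          simp only [List.map_cons, List.take_succ_cons, List.take_zero,
            List.drop_succ_cons, List.drop_zero, List.cons_append, List.nil_append]
          rw [show (0 : Int) = pvDigit '0' from by decide]
        rw [h1, join_digits _ hdig2]
      rw [hA, show PySem.Int.toChars 0 = ['0'] from by decide]
      have hgoodform : (((List.range ((c :: rest).length + 1)).map
            (fun k => String.ofList ((c :: rest).take k ++ ['0'] ++ (c :: rest).drop k))).filter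
            (fun x => !(PySem.Str.startswith x "0")))
          = (List.range (rest.length + 1)).map
            (fun k => String.ofList (c :: (rest.take k ++ '0' :: rest.drop k))) := by
        rw [show (c :: rest).length + 1 = (rest.length + 1) + 1 from by simp,
          List.range_succ_eq_map, List.map_cons, List.map_map, List.filter_cons]
        have h0 : (!(PySem.Str.startswith
            (String.ofList ((c :: rest).take 0 ++ ['0'] ++ (c :: rest).drop 0)) "0")) = false := by
          simp only [List.take_zero, List.drop_zero, List.nil_append, List.singleton_append]
          rw [sw_ofList]
          simp
        rw [h0]
        simp only [Bool.false_eq_true, if_false]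
        rw [List.filter_eq_self.mpr ?_]
        · apply List.map_congr_left
          intro k _
          simp [List.take_succ_cons, List.drop_succ_cons, Function.comp]
        · intro y hy
          obtain ⟨k, _, rfl⟩ := List.mem_map.mp hy
          simp only [Function.comp, List.take_succ_cons, List.drop_succ_cons, List.cons_append]
          rw [sw_ofList]
          simp [hc0]
      rw [hgoodform, List.range_succ_eq_map, List.map_cons, List.map_map]
      simp only [List.take_zero, List.drop_zero, List.nil_append, List.isEmpty_cons,
        Bool.false_eq_true, if_false]
      have hmin : PySem.List.min? (String.ofList (c :: '0' :: rest) ::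
            (List.range rest.length).map
              (fun k => String.ofList (c :: (rest.take (Nat.succ k) ++ '0' :: rest.drop (Nat.succ k)))))
            (fun x => x) = some (String.ofList (c :: '0' :: rest)) := by
        apply min?_first
        · exact List.mem_cons_self
        · intro y hy
          rcases List.mem_cons.mp hy with rfl | hy'
          · exact le_refl _
          · obtain ⟨k, _, rfl⟩ := List.mem_map.mp hy'
            rw [String.le_iff_toList_le, String.toList_ofList, String.toList_ofList]
            exact List.cons_le_cons c (KL1 '0' rest (Nat.succ k)
              (fun a ha => by
                have := hdig a (by simp [ha])
                rw [Char.le_def]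
                change (48 : UInt32) ≤ a.val
                rw [UInt32.le_iff_toNat_le]
                exact this.1))
      rw [show ((fun k => String.ofList (c :: (rest.take k ++ '0' :: rest.drop k))) ∘ Nat.succ)
          = (fun k => String.ofList (c :: (rest.take (Nat.succ k) ++ '0' :: rest.drop (Nat.succ k))))
          from rfl, hmin]
      rfl
  · -- digit sum not divisible: A's greedy insertion equals B's minimal candidate
    rw [if_neg hm, if_neg hm]
    have hc0 : c ≠ '0' := by
      rcases hlead with heq | ⟨c', r', heq, hne'⟩
      · exfalso
        apply hm
        injection heq with h1 h2
        rw [h1, h2]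
        decide
      · injection heq with hc _
        rw [hc]; exact hne'
    have hmb : 1 ≤ 9 - PySem.Int.mod (((c :: rest).map pvDigit).sum) 9 ∧
        9 - PySem.Int.mod (((c :: rest).map pvDigit).sum) 9 ≤ 8 := by
      rw [pmod9] at hm ⊢
      omega
    rw [ar_eq _ hm, PySem.List.min?_id_cons]
    simp only [List.foldl_nil, Option.getD_some]
    obtain ⟨dc, hdD, hdV, hdT, hd0⟩ :
        ∃ dc, IsDig dc ∧ pvDigit dc = 9 - PySem.Int.mod (((c :: rest).map pvDigit).sum) 9 ∧
          PySem.Int.toChars (9 - PySem.Int.mod (((c :: rest).map pvDigit).sum) 9) = [dc] ∧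
          dc ≠ '0' := by
      have h8 : 9 - PySem.Int.mod (((c :: rest).map pvDigit).sum) 9 = 1 ∨
          9 - PySem.Int.mod (((c :: rest).map pvDigit).sum) 9 = 2 ∨
          9 - PySem.Int.mod (((c :: rest).map pvDigit).sum) 9 = 3 ∨
          9 - PySem.Int.mod (((c :: rest).map pvDigit).sum) 9 = 4 ∨
          9 - PySem.Int.mod (((c :: rest).map pvDigit).sum) 9 = 5 ∨
          9 - PySem.Int.mod (((c :: rest).map pvDigit).sum) 9 = 6 ∨
          9 - PySem.Int.mod (((c :: rest).map pvDigit).sum) 9 = 7 ∨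
          9 - PySem.Int.mod (((c :: rest).map pvDigit).sum) 9 = 8 := by omega
      rcases h8 with h|h|h|h|h|h|h|h <;> rw [h] <;>
        first
        | exact ⟨'1', by decide, by decide, by decide, by decide⟩
        | exact ⟨'2', by decide, by decide, by decide, by decide⟩
        | exact ⟨'3', by decide, by decide, by decide, by decide⟩
        | exact ⟨'4', by decide, by decide, by decide, by decide⟩
        | exact ⟨'5', by decide, by decide, by decide, by decide⟩
        | exact ⟨'6', by decide, by decide, by decide, by decide⟩
        | exact ⟨'7', by decide, by decide, by decide, by decide⟩
        | exact ⟨'8', by decide, by decide, by decide, by decide⟩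
    rw [solveLoop_go _ _ 0 (by omega), hdT]
    simp only [List.drop_zero, Nat.zero_add]
    set J := (((c :: rest).map pvDigit).findIdx
      (fun x => decide (9 - PySem.Int.mod (((c :: rest).map pvDigit).sum) 9 < x))) with hJdef
    have hJle : J ≤ (c :: rest).length := by
      rw [hJdef]
      have h := List.findIdx_le_length (p := (fun x =>
        decide (9 - PySem.Int.mod (((c :: rest).map pvDigit).sum) 9 < x)))
        (xs := ((c :: rest).map pvDigit))
      rwa [List.length_map] at h
    have hJc : ∀ i (h : i < (c :: rest).length), i < J → (c :: rest)[i] ≤ dc := by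
      intro i h hi
      have hnp := List.not_of_lt_findIdx (p := (fun x =>
        decide (9 - PySem.Int.mod (((c :: rest).map pvDigit).sum) 9 < x)))
        (xs := ((c :: rest).map pvDigit)) (show i < _ from hi)
      simp only [List.getElem_map] at hnp
      rw [decide_eq_false_iff_not, not_lt] at hnp
      rw [dv_le_iff _ _ (hdig _ (List.getElem_mem h)) hdD, hdV]
      exact hnp
    have hJt : J = (c :: rest).length ∨ ∃ h : J < (c :: rest).length, dc < (c :: rest)[J] := by
      by_cases hlt : J < (c :: rest).length
      · right
        refine ⟨hlt, ?_⟩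
        have hp := List.findIdx_getElem (p := (fun x =>
          decide (9 - PySem.Int.mod (((c :: rest).map pvDigit).sum) 9 < x)))
          (xs := ((c :: rest).map pvDigit)) (w := show J < _ from by simpa using hlt)
        simp only [List.getElem_map, decide_eq_true_eq] at hp
        rw [dv_lt_iff _ _ hdD (hdig _ (List.getElem_mem hlt)), hdV]
        exact hp
      · left
        omega
    have hA : pvJoinDigits (PySem.List.insert ((c :: rest).map pvDigit) (J : Int)
          (9 - PySem.Int.mod (((c :: rest).map pvDigit).sum) 9))
        = String.ofList ((c :: rest).take J ++ dc :: (c :: rest).drop J) := by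
      rw [PySem.List.insert_natCast _ J _ (by simpa using hJle), ← hdV,
        ← List.map_take, ← List.map_drop,
        show ((c :: rest).take J).map pvDigit ++ pvDigit dc :: ((c :: rest).drop J).map pvDigit
          = ((c :: rest).take J ++ dc :: (c :: rest).drop J).map pvDigit from by
            simp [List.map_append]]
      apply join_digits
      intro x hx
      rcases List.mem_append.mp hx with hx' | hx'
      · exact hdig x (List.mem_of_mem_take hx')
      · rcases List.mem_cons.mp hx' with rfl | hx''
        · exact hdD
        · exact hdig x (List.mem_of_mem_drop hx'')
    rw [hA]
    have hgood : (((List.range ((c :: rest).length + 1)).map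
          (fun k => String.ofList ((c :: rest).take k ++ [dc] ++ (c :: rest).drop k))).filter
          (fun x => !(PySem.Str.startswith x "0")))
        = ((List.range ((c :: rest).length + 1)).map
          (fun k => String.ofList ((c :: rest).take k ++ [dc] ++ (c :: rest).drop k))) := by
      apply List.filter_eq_self.mpr
      intro y hy
      obtain ⟨k, _, rfl⟩ := List.mem_map.mp hy
      cases k with
      | zero =>
        simp only [List.take_zero, List.drop_zero, List.nil_append, List.singleton_append]
        rw [sw_ofList]
        simp [hd0]
      | succ k =>
        simp only [List.take_succ_cons, List.drop_succ_cons, List.cons_append]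
        rw [sw_ofList]
        simp [hc0]
    rw [hgood, List.range_succ_eq_map, List.map_cons, List.map_map]
    simp only [List.take_zero, List.drop_zero, List.nil_append, List.singleton_append,
      List.isEmpty_cons, Bool.false_eq_true, if_false]
    have hmin : PySem.List.min? (String.ofList (dc :: c :: rest) ::
          (List.range (c :: rest).length).map
            ((fun k => String.ofList ((c :: rest).take k ++ [dc] ++ (c :: rest).drop k)) ∘ Nat.succ))
          (fun x => x)
        = some (String.ofList ((c :: rest).take J ++ dc :: (c :: rest).drop J)) := by
      apply min?_first
      · by_cases h0 : J = 0
        · rw [h0]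
          rw [List.mem_cons]
          left
          simp
        · obtain ⟨k, hk⟩ := Nat.exists_eq_succ_of_ne_zero h0
          rw [hk]
          apply List.mem_cons_of_mem
          refine List.mem_map.mpr ⟨k, List.mem_range.mpr (by omega), ?_⟩
          simp [Function.comp]
      · intro y hy
        rcases List.mem_cons.mp hy with rfl | hy'
        · rw [String.le_iff_toList_le, String.toList_ofList, String.toList_ofList]
          exact KL2 J dc (c :: rest) 0 hJle (by omega) hJc hJt
        · obtain ⟨k, hkmem, rfl⟩ := List.mem_map.mp hy'
          simp only [Function.comp, List.take_succ_cons, List.drop_succ_cons,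
            List.cons_append]
          rw [String.le_iff_toList_le, String.toList_ofList, String.toList_ofList]
          have hk1 : k + 1 ≤ (c :: rest).length := by
            have := List.mem_range.mp hkmem
            simpa using this
          have := KL2 J dc (c :: rest) (k + 1) hJle hk1 hJc hJt
          simpa using this
    rw [hmin]
    rfl

-- ===== VERDICT (by name: the statement is the Claim_ definition above) =====
theorem solve_spec : Claim_equal_solve := by
  intro n _ hpre
  unfold Spec_solve solve solve_alt
  exact main_gen (PySem.Int.toChars n) (toChars_digs n hpre) (toChars_lead n hpre)
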